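-- pv_equiv track=rewrite | github.com/ki-ARA-sh/Algorithms_Tutorial | _011_recursive_sequence/code.py | fn
-- ===== SOURCE A (Python) =====
-- def fn(i):
--     if i == 0:
--         return 5
--     tmp = fn(i - 1)
--     if i % 2 == 0:
--         return tmp - 21
--     else:
--         return tmp ** 2
-- ===== SOURCE B (Python) =====
-- def fn(i):
--     val = 5
--     for j in range(1, i + 1):
--         if j % 2 == 0:
--             val = val - 21
--         else:
--             val = val * val
--     return val
-- ===== Notes on version B (the rewrite author's own statement) =====
-- stated objective: idiomatic
-- what changed: Replaced the recursive descent by an iterative foldl-style loop accumulating the value upward.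
import Mathlib
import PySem

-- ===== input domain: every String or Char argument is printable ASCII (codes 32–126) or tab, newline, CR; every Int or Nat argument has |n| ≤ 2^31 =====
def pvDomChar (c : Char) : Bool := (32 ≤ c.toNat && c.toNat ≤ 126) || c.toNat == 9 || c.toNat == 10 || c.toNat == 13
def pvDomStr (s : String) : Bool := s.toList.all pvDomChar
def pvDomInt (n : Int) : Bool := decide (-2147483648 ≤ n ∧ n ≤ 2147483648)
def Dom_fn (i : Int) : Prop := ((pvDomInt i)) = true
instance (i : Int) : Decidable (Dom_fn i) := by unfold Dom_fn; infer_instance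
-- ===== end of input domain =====

-- B replaces A's recursion by an iterative loop over range(1, i+1) (same per-step arithmetic);
-- equivalence is claimed for 0 ≤ i, where A returns.

-- ===== PORT A =====
-- A recurses on i-1 with base i == 0; on 0 ≤ i this is recursion on i.toNat, transcribed here
-- (negative i, where Python recurses forever, is outside Pre_fn).
def fnNat : Nat → Int
  | 0 => 5
  | n + 1 =>
    let tmp := fnNat n
    if ((n : Int) + 1) % 2 == 0 then tmp - 21 else tmp ^ 2

def fn (i : Int) : Int := fnNat i.toNat

-- ===== PORT B =====
def fn_alt (i : Int) : Int :=
  (PySem.List.pyRange 1 (i + 1) 1).foldl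
    (fun val j => if j % 2 == 0 then val - 21 else val * val) 5

-- ===== PRECONDITION & SPEC =====
-- Pre_ excludes negative i, on which Python A recurses without reaching the base case (RecursionError).
def Pre_fn (i : Int) : Prop := 0 ≤ i
instance (i : Int) : Decidable (Pre_fn i) := by unfold Pre_fn; infer_instance
def pvWitness_fn : Int := (3)

def Spec_fn (i : Int) (out : Int) : Prop := out = fn_alt i
instance (i : Int) (out : Int) : Decidable (Spec_fn i out) := by unfold Spec_fn; infer_instance

-- ===== CLAIM (what is proved, stated in full; the proofs are below) =====
def Claim_equal_fn : Prop := ∀ (i : Int), Dom_fn i → Pre_fn i → Spec_fn i (fn i)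

-- ===== LEMMAS AND PROOFS =====
theorem fn_alt_nat (n : Nat) :
    (PySem.List.pyRange 1 ((n : Int) + 1) 1).foldl
      (fun val j => if j % 2 == 0 then val - 21 else val * val) 5 = fnNat n := by
  induction n with
  | zero => simp [PySem.List.pyRange_one_eq_nil, fnNat]
  | succ m ih =>
    push_cast
    rw [PySem.List.pyRange_one_succ_right (by omega), List.foldl_append, ih]
    simp [fnNat, sq]

-- ===== VERDICT (by name: the statement is the Claim_ definition above) =====
theorem fn_spec : Claim_equal_fn := by
  intro i _ hpre
  unfold Spec_fn fn fn_alt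
  have : ((i.toNat : Int)) = i := Int.toNat_of_nonneg hpre
  rw [← this, fn_alt_nat, Int.toNat_natCast]
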